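-- pv_equiv track=rewrite | github.com/mgmk2/atcoder-python | ABC/158/f.py | find
-- ===== SOURCE A (Python) =====
-- import bisect
--
-- def find(l, n, M, X, D):
--     r = bisect.bisect_left(X, X[l] + D[l])
--     y = 1
--     R = r
--     for i in range(l, min(r, n - 1)):
--         if M[i] == 0:
--             M, yi, ri = find(i + 1, n, M, X, D)
--             M[i] += yi
--             y += yi
--             R = max(R, ri)
--     return M, y, R
-- ===== SOURCE B (Python) =====
-- import bisect
--
-- # Iterative DFS with an explicit frame stack instead of A's recursion; when a
-- # subtree finishes, the parent jumps past the subtree's covered range (every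
-- # zero entry in it has just been marked, so scanning it again cannot trigger).
-- # Like A, mutates M in place (and returns it); no recursion is used.
-- def find(l, n, M, X, D):
--     r = bisect.bisect_left(X, X[l] + D[l])
--     stack = [[l, min(r, n - 1), 1, r, None]]  # frame: [i, e, y, R, trig]
--     while True:
--         f = stack[-1]
--         i = f[0]
--         if i < f[1]:
--             if M[i] == 0:
--                 f[0] = i + 1
--                 r = bisect.bisect_left(X, X[i + 1] + D[i + 1])
--                 stack.append([i + 1, min(r, n - 1), 1, r, i])
--             else:
--                 f[0] = i + 1
--         else:
--             stack.pop()
--             if not stack: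
--                 return M, f[2], f[3]
--             g = stack[-1]
--             M[f[4]] += f[2]
--             g[2] += f[2]
--             g[3] = max(g[3], f[3])
--             g[0] = max(g[0], min(f[3], n - 1))  # resume past the subtree's coverage
-- ===== Notes on version B (the rewrite author's own statement) =====
-- stated objective: alternative
-- what changed: A's recursive DFS is replaced by an iterative explicit-stack DFS that, when a subtree finishes, resumes the parent's scan past the subtree's covered range (whose zero entries were all just marked), instead of rescanning it; no Python recursion is used.
-- outside the precondition, e.g. on find(-1, 1, [0], [5], [1]): A returns ([1], 2, 1), B returns ([1], 2, 1)
import Mathlib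
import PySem

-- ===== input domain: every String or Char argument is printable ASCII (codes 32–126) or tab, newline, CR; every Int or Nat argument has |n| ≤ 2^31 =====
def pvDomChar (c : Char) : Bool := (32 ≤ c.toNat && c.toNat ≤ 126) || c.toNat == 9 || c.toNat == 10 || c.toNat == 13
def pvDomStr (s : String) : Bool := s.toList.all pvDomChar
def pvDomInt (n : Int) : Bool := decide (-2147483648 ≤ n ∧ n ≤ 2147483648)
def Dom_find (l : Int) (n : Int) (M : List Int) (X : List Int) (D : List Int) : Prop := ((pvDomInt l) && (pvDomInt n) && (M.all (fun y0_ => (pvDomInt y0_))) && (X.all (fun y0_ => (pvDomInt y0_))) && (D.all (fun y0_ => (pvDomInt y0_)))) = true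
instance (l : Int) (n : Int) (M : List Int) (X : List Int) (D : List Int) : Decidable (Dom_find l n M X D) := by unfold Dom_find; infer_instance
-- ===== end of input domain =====

-- B replaces A's recursive DFS by an explicit frame stack (no recursion) and, when a subtree
-- finishes, resumes the parent's scan past the subtree's covered range (every zero entry there was
-- just marked, so rescanning it cannot trigger); same return value, and like A it mutates M in
-- place in Python (the equality proved is about the returned triple).

-- ===== PORT A =====
-- shared primitive of both Pythons: bisect.bisect_left (results are Python ints)
def pvBisect (X : List Int) (v : Int) : Int := (PySem.List.bisectLeft X v : Int)

-- the body of A's `for i in range(l, min(r, n-1))` loop, carrying (M, y, R); the recursive call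
-- `find(i+1, …)` is inlined as computing its bisect bound and running the loop from i+1.
-- `fuel` is only a structural totality guard: the wrapper findLoop below always supplies enough
-- ((n-1-i) bounds how often the index can still advance; with fuel 0 the loop guard is false anyway).
def findLoopF (n : Int) (X D : List Int) : Nat → Int → Int → List Int → Int → Int → List Int × Int × Int
  | 0, _, _, M, y, R => (M, y, R)
  | fuel + 1, i, r, M, y, R =>
    if i < min r (n - 1) then
      if PySem.List.pyGetD M i 0 = 0 then
        let r' := pvBisect X (PySem.List.pyGetD X (i + 1) 0 + PySem.List.pyGetD D (i + 1) 0)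
        let t := findLoopF n X D fuel (i + 1) r' M 1 r'
        findLoopF n X D fuel (i + 1) r
          (PySem.List.pySetD t.1 i (PySem.List.pyGetD t.1 i 0 + t.2.1)) (y + t.2.1) (max R t.2.2)
      else findLoopF n X D fuel (i + 1) r M y R
    else (M, y, R)

def findLoop (n : Int) (X D : List Int) (i r : Int) (M : List Int) (y R : Int) : List Int × Int × Int :=
  findLoopF n X D (n - 1 - i).toNat i r M y R

def find (l : Int) (n : Int) (M : List Int) (X : List Int) (D : List Int) : List Int × Int × Int :=
  let r := pvBisect X (PySem.List.pyGetD X l 0 + PySem.List.pyGetD D l 0)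
  findLoop n X D l r M 1 r

-- ===== PORT B =====
-- a stack frame [i, e, y, R, trig] of Source B; `he` records that e was built as min(r, n-1)
structure PvFrame (n : Int) where
  i : Int
  e : Int
  y : Int
  R : Int
  trig : Option Int
  he : e ≤ n - 1

def pvMkFrame (n : Int) (X D : List Int) (k : Int) (t : Option Int) : PvFrame n :=
  let r := pvBisect X (PySem.List.pyGetD X k 0 + PySem.List.pyGetD D k 0)
  ⟨k, min r (n - 1), 1, r, t, min_le_right _ _⟩

-- `M[f[4]] += f[2]` of Source B (trig = None is unreachable there: the root is popped only when the stack empties)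
def pvApplyTrig (trig : Option Int) (y : Int) (M : List Int) : List Int :=
  match trig with
  | none => M
  | some t => PySem.List.pySetD M t (PySem.List.pyGetD M t 0 + y)

def pvMeasure (n : Int) (stack : List (PvFrame n)) : Nat :=
  (stack.map (fun f => 2 ^ (2 * (n - f.i).toNat + 1))).sum

-- the while-loop of Source B: one call = one iteration; `fuel` is only a structural totality
-- guard (pvMeasure strictly drops at every iteration, so the wrapper pvRunB always supplies enough)
def pvRunBF (n : Int) (X D : List Int) : Nat → List (PvFrame n) → List Int → List Int × Int × Int
  | 0, _, M => (M, 0, 0)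
  | fuel + 1, stack, M =>
    match stack with
    | [] => (M, 0, 0)  -- unreachable in Source B: the loop runs with a nonempty stack
    | f :: rest =>
      if f.i < f.e then
        if PySem.List.pyGetD M f.i 0 = 0 then
          pvRunBF n X D fuel (pvMkFrame n X D (f.i + 1) (some f.i) :: ⟨f.i + 1, f.e, f.y, f.R, f.trig, f.he⟩ :: rest) M
        else
          pvRunBF n X D fuel (⟨f.i + 1, f.e, f.y, f.R, f.trig, f.he⟩ :: rest) M
      else
        match rest with
        | [] => (M, f.y, f.R)
        | g :: rest' =>
          pvRunBF n X D fuel (⟨max g.i (min f.R (n - 1)), g.e, g.y + f.y, max g.R f.R, g.trig, g.he⟩ :: rest')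
            (pvApplyTrig f.trig f.y M)

def pvRunB (n : Int) (X D : List Int) (stack : List (PvFrame n)) (M : List Int) : List Int × Int × Int :=
  pvRunBF n X D (pvMeasure n stack) stack M

def find_alt (l : Int) (n : Int) (M : List Int) (X : List Int) (D : List Int) : List Int × Int × Int :=
  pvRunB n X D [pvMkFrame n X D l none] M

-- ===== PRECONDITION & SPEC =====
-- Pre_ restricts to the natural domain (0 ≤ l, n within the bounds of the three lists): outside it
-- Python A generally raises IndexError, and on negative l the value A returns comes from Python's
-- accidental negative-index wraparound (B happens to match it there).
def Pre_find (l : Int) (n : Int) (M : List Int) (X : List Int) (D : List Int) : Prop :=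
  0 ≤ l ∧ l < (X.length : Int) ∧ l < (D.length : Int) ∧
  n ≤ (X.length : Int) ∧ n ≤ (D.length : Int) ∧ n - 1 ≤ (M.length : Int)
instance (l : Int) (n : Int) (M : List Int) (X : List Int) (D : List Int) : Decidable (Pre_find l n M X D) := by unfold Pre_find; infer_instance

def pvWitness_find : Int × Int × List Int × List Int × List Int := (0, 3, [0, 0, 0], [1, 2, 3], [1, 1, 1])

def Spec_find (l : Int) (n : Int) (M : List Int) (X : List Int) (D : List Int) (out : List Int × Int × Int) : Prop := out = find_alt l n M X D
instance (l : Int) (n : Int) (M : List Int) (X : List Int) (D : List Int) (out : List Int × Int × Int) : Decidable (Spec_find l n M X D out) := by unfold Spec_find; infer_instance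

-- ===== CLAIM (what is proved, stated in full; the proofs are below) =====
def Claim_equal_find : Prop := ∀ (l : Int) (n : Int) (M : List Int) (X : List Int) (D : List Int), Dom_find l n M X D → Pre_find l n M X D → Spec_find l n M X D (find l n M X D)

-- ===== LEMMAS AND PROOFS =====

-- fuel-sufficiency helpers for the while-loop of Source B
theorem pvPow_push_lt (a g : Nat) (h : g = a + 1) :
    2 ^ (2 * a + 1) + 2 ^ (2 * a + 1) < 2 ^ (2 * g + 1) := by
  subst h
  have h1 : 2 ^ (2 * a + 1) + 2 ^ (2 * a + 1) = 2 ^ (2 * a + 2) := by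
    rw [← two_mul, ← pow_succ']
  rw [h1]
  exact Nat.pow_lt_pow_right (by norm_num) (by omega)

theorem pvPow_lt (a g : Nat) (h : a < g) : 2 ^ (2 * a + 1) < 2 ^ (2 * g + 1) :=
  Nat.pow_lt_pow_right (by norm_num) (by omega)

theorem pvPow_le (a g : Nat) (h : a ≤ g) : 2 ^ (2 * a + 1) ≤ 2 ^ (2 * g + 1) :=
  Nat.pow_le_pow_right (by norm_num) (by omega)

theorem pvMeasure_push (n : Int) (X D : List Int) (f : PvFrame n) (rest : List (PvFrame n))
    (h : f.i < f.e) :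
    pvMeasure n (pvMkFrame n X D (f.i + 1) (some f.i) :: ⟨f.i + 1, f.e, f.y, f.R, f.trig, f.he⟩ :: rest)
      < pvMeasure n (f :: rest) := by
  simp only [pvMeasure, pvMkFrame, List.map_cons, List.sum_cons]
  have hi : f.i < n - 1 := by have := f.he; omega
  have hlt := pvPow_push_lt (n - (f.i + 1)).toNat (n - f.i).toNat (by omega)
  omega

theorem pvMeasure_advance (n : Int) (f : PvFrame n) (rest : List (PvFrame n)) (h : f.i < f.e) :
    pvMeasure n (⟨f.i + 1, f.e, f.y, f.R, f.trig, f.he⟩ :: rest) < pvMeasure n (f :: rest) := by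
  simp only [pvMeasure, List.map_cons, List.sum_cons]
  have hi : f.i < n - 1 := by have := f.he; omega
  have hlt := pvPow_lt (n - (f.i + 1)).toNat (n - f.i).toNat (by omega)
  omega

theorem pvMeasure_pop (n : Int) (f g g' : PvFrame n) (rest' : List (PvFrame n))
    (hgi : g.i ≤ g'.i) :
    pvMeasure n (g' :: rest') < pvMeasure n (f :: g :: rest') := by
  simp only [pvMeasure, List.map_cons, List.sum_cons]
  have hle := pvPow_le (n - g'.i).toNat (n - g.i).toNat (by omega)
  have hpos : 0 < 2 ^ (2 * (n - f.i).toNat + 1) := Nat.two_pow_pos _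
  omega


theorem pvWitness_ok : Dom_find (pvWitness_find.1) (pvWitness_find.2.1) (pvWitness_find.2.2.1) (pvWitness_find.2.2.2.1) (pvWitness_find.2.2.2.2) ∧ Pre_find (pvWitness_find.1) (pvWitness_find.2.1) (pvWitness_find.2.2.1) (pvWitness_find.2.2.2.1) (pvWitness_find.2.2.2.2) := by
  constructor <;> decide

-- the loop result does not depend on the fuel once the fuel covers the remaining indices
theorem findLoopF_fuel (n : Int) (X D : List Int) :
    ∀ (fuel fuel' : Nat) (i r : Int) (M : List Int) (y R : Int),
      n - 1 - i ≤ (fuel : Int) → n - 1 - i ≤ (fuel' : Int) →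
      findLoopF n X D fuel i r M y R = findLoopF n X D fuel' i r M y R := by
  intro fuel
  induction fuel with
  | zero =>
    intro fuel' i r M y R h1 h2
    cases fuel' with
    | zero => rfl
    | succ f' =>
      simp only [findLoopF]
      rw [if_neg (by simp at h1; omega)]
  | succ fuel ih =>
    intro fuel' i r M y R h1 h2
    cases fuel' with
    | zero =>
      simp only [findLoopF]
      rw [if_neg (by simp at h2; omega)]
    | succ f' =>
      simp only [findLoopF]
      by_cases hg : i < min r (n - 1)
      · rw [if_pos hg, if_pos hg]
        have hb1 : n - 1 - (i + 1) ≤ (fuel : Int) := by push_cast at h1 ⊢; omega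
        have hb2 : n - 1 - (i + 1) ≤ (f' : Int) := by push_cast at h2 ⊢; omega
        by_cases hz : PySem.List.pyGetD M i 0 = 0
        · rw [if_pos hz, if_pos hz,
              ih f' (i + 1) (pvBisect X (PySem.List.pyGetD X (i + 1) 0 + PySem.List.pyGetD D (i + 1) 0)) M 1 (pvBisect X (PySem.List.pyGetD X (i + 1) 0 + PySem.List.pyGetD D (i + 1) 0)) hb1 hb2,
              ih f' (i + 1) r _ _ _ hb1 hb2]
        · rw [if_neg hz, if_neg hz, ih f' (i + 1) r M y R hb1 hb2]
      · rw [if_neg hg, if_neg hg]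

-- one unfolding of A's loop
theorem findLoop_eq (n : Int) (X D : List Int) (i r : Int) (M : List Int) (y R : Int) :
    findLoop n X D i r M y R =
      if i < min r (n - 1) then
        if PySem.List.pyGetD M i 0 = 0 then
          let r' := pvBisect X (PySem.List.pyGetD X (i + 1) 0 + PySem.List.pyGetD D (i + 1) 0)
          let t := findLoop n X D (i + 1) r' M 1 r'
          findLoop n X D (i + 1) r
            (PySem.List.pySetD t.1 i (PySem.List.pyGetD t.1 i 0 + t.2.1)) (y + t.2.1) (max R t.2.2)
        else findLoop n X D (i + 1) r M y R
      else (M, y, R) := by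
  unfold findLoop
  by_cases hg : i < min r (n - 1)
  · obtain ⟨f, hf⟩ : ∃ f, (n - 1 - i).toNat = f + 1 := ⟨(n - 1 - i).toNat - 1, by omega⟩
    rw [hf]
    simp only [findLoopF]
    rw [if_pos hg, if_pos hg]
    have hb : n - 1 - (i + 1) ≤ (f : Int) := by omega
    have hb' : n - 1 - (i + 1) ≤ ((n - 1 - (i + 1)).toNat : Int) := by omega
    by_cases hz : PySem.List.pyGetD M i 0 = 0
    · rw [if_pos hz, if_pos hz,
          findLoopF_fuel n X D f (n - 1 - (i + 1)).toNat (i + 1) (pvBisect X (PySem.List.pyGetD X (i + 1) 0 + PySem.List.pyGetD D (i + 1) 0)) M 1 (pvBisect X (PySem.List.pyGetD X (i + 1) 0 + PySem.List.pyGetD D (i + 1) 0)) hb hb',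
          findLoopF_fuel n X D f (n - 1 - (i + 1)).toNat (i + 1) r _ _ _ hb hb']
    · rw [if_neg hz, if_neg hz, findLoopF_fuel n X D f (n - 1 - (i + 1)).toNat (i + 1) r M y R hb hb']
  · rw [if_neg hg]
    rcases hf : (n - 1 - i).toNat with _ | f
    · rfl
    · simp only [findLoopF]
      rw [if_neg hg]

-- A's loop only looks at r through min r (n-1)
theorem findLoopF_congr (n : Int) (X D : List Int) :
    ∀ (fuel : Nat) (i r r' : Int) (M : List Int) (y R : Int), min r (n - 1) = min r' (n - 1) →
      findLoopF n X D fuel i r M y R = findLoopF n X D fuel i r' M y R := by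
  intro fuel
  induction fuel with
  | zero => intro _ _ _ _ _ _ _; rfl
  | succ fuel ih =>
    intro i r r2 M y R hmin
    simp only [findLoopF]
    by_cases hg : i < min r (n - 1)
    · rw [if_pos hg, if_pos (show i < min r2 (n - 1) by omega)]
      by_cases hz : PySem.List.pyGetD M i 0 = 0
      · rw [if_pos hz, if_pos hz, ih (i + 1) r r2 _ _ _ hmin]
      · rw [if_neg hz, if_neg hz, ih (i + 1) r r2 M y R hmin]
    · rw [if_neg hg, if_neg (show ¬ i < min r2 (n - 1) by omega)]

theorem findLoop_congr (n : Int) (X D : List Int) (i r : Int) (M : List Int) (y R : Int) :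
    ∀ r', min r (n - 1) = min r' (n - 1) → findLoop n X D i r M y R = findLoop n X D i r' M y R := by
  intro r' hmin
  unfold findLoop
  exact findLoopF_congr n X D _ i r r' M y R hmin

-- A's loop skips entries already known nonzero
theorem findLoop_skip (n : Int) (X D : List Int) (r : Int) :
    ∀ (k : Nat) (i : Int) (M : List Int) (y R : Int),
      (∀ j : Int, i ≤ j → j < i + k → j < min r (n - 1) → PySem.List.pyGetD M j 0 ≠ 0) →
      findLoop n X D i r M y R = findLoop n X D (i + k) r M y R := by
  intro k
  induction k with
  | zero => intro i M y R _; norm_num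
  | succ k ih =>
    intro i M y R hnz
    by_cases hi : i < min r (n - 1)
    · have hz : PySem.List.pyGetD M i 0 ≠ 0 := hnz i le_rfl (by push_cast; omega) hi
      conv_lhs => rw [findLoop_eq]
      rw [if_pos hi, if_neg hz]
      have h2 := ih (i + 1) M y R (fun j h1 h2 h3 => hnz j (by omega) (by push_cast at h2 ⊢; omega) h3)
      rw [h2]
      congr 1
      push_cast
      ring
    · rw [findLoop_eq, if_neg hi, findLoop_eq,
         if_neg (show ¬ i + ((k + 1 : Nat) : Int) < min r (n - 1) by push_cast; omega)]

-- reading after a single Python list assignment, nonnegative indices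
theorem pvGetD_set (M : List Int) (t v j : Int) (ht0 : 0 ≤ t) (htl : t < (M.length : Int))
    (hj : 0 ≤ j) :
    PySem.List.pyGetD (PySem.List.pySetD M t v) j 0 =
      if j = t then v else PySem.List.pyGetD M j 0 := by
  obtain ⟨tn, rfl⟩ : ∃ tn : Nat, t = (tn : Int) := ⟨t.toNat, by omega⟩
  obtain ⟨jn, rfl⟩ : ∃ jn : Nat, j = (jn : Int) := ⟨j.toNat, by omega⟩
  rw [PySem.List.pyGetD_pySetD_natCast M tn jn v 0 (by omega)]
  simp

-- a single assignment changes a cell to v or leaves it; any index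
theorem pvGetD_set_or (M : List Int) (t v : Int) (ht0 : 0 ≤ t) (htl : t < (M.length : Int))
    (j d : Int) :
    PySem.List.pyGetD (PySem.List.pySetD M t v) j d = v ∨
    PySem.List.pyGetD (PySem.List.pySetD M t v) j d = PySem.List.pyGetD M j d := by
  have hset : PySem.List.pySetD M t v = M.set t.toNat v :=
    PySem.List.pySetD_of_nonneg M v ht0
  rw [hset]
  simp only [PySem.List.pyGetD, PySem.List.pyGet?, List.length_set]
  cases hk : PySem.List.pyIdx? M.length j with
  | none => simp
  | some k =>
    simp only [Option.bind_some]
    rw [List.getElem?_set]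
    by_cases hek : t.toNat = k
    · subst hek
      rw [if_pos rfl, if_pos (by omega)]
      simp
    · rw [if_neg hek]
      simp

-- ===== machine invariants (proof-only helpers) =====
def pvHcov (n : Int) (M : List Int) (f : PvFrame n) : Prop :=
  ∀ j : Int, f.e ≤ j → j < min f.R (n - 1) → PySem.List.pyGetD M j 0 ≠ 0

def pvHscan (n : Int) (M : List Int) (f : PvFrame n) (ub : Int) : Prop :=
  ∀ t, f.trig = some t → 0 ≤ t ∧ t < f.i ∧
    ∀ j : Int, t < j → j < ub → j < f.e → PySem.List.pyGetD M j 0 ≠ 0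

def pvFrameInv (n : Int) (M : List Int) (f : PvFrame n) (ub : Int) : Prop :=
  0 ≤ f.i ∧ 1 ≤ f.y ∧ pvHcov n M f ∧ pvHscan n M f ub

def pvLink (n : Int) (M : List Int) (c g : PvFrame n) : Prop :=
  ∃ t, c.trig = some t ∧ 0 ≤ t ∧ g.i = t + 1 ∧ t < g.e ∧ PySem.List.pyGetD M t 0 = 0 ∧
    (∀ u, g.trig = some u → u < t)

def pvStackRest (n : Int) (M : List Int) : PvFrame n → List (PvFrame n) → Prop
  | _, [] => True
  | c, g :: rest => pvLink n M c g ∧ pvFrameInv n M g (g.i - 1) ∧ pvStackRest n M g rest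

def pvStackInv (n : Int) (M : List Int) : List (PvFrame n) → Prop
  | [] => True
  | f :: rest => pvFrameInv n M f f.i ∧ pvStackRest n M f rest

-- the A-side meaning of the machine's suspended stack
def pvUnwind (n : Int) (X D : List Int) :
    List (PvFrame n) → (List Int × Int × Int) → Option Int → (List Int × Int × Int)
  | [], res, _ => res
  | g :: rest, res, trig =>
      pvUnwind n X D rest
        (findLoop n X D g.i g.e (pvApplyTrig trig res.2.1 res.1) (g.y + res.2.1) (max g.R res.2.2))
        g.trig

theorem pvHcov_set (n : Int) (M : List Int) (f : PvFrame n) (t v : Int) (ht0 : 0 ≤ t)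
    (htl : t < (M.length : Int)) (hv : v ≠ 0) (h : pvHcov n M f) :
    pvHcov n (PySem.List.pySetD M t v) f := by
  intro j h1 h2
  rcases pvGetD_set_or M t v ht0 htl j 0 with hc | hc <;> rw [hc]
  · exact hv
  · exact h j h1 h2

theorem pvHscan_set (n : Int) (M : List Int) (f : PvFrame n) (ub t v : Int) (ht0 : 0 ≤ t)
    (htl : t < (M.length : Int)) (hv : v ≠ 0) (h : pvHscan n M f ub) :
    pvHscan n (PySem.List.pySetD M t v) f ub := by
  intro u hu
  obtain ⟨h1, h2, h3⟩ := h u hu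
  refine ⟨h1, h2, fun j j1 j2 j3 => ?_⟩
  rcases pvGetD_set_or M t v ht0 htl j 0 with hc | hc <;> rw [hc]
  · exact hv
  · exact h3 j j1 j2 j3

theorem pvFrameInv_set (n : Int) (M : List Int) (f : PvFrame n) (ub t v : Int) (ht0 : 0 ≤ t)
    (htl : t < (M.length : Int)) (hv : v ≠ 0) (h : pvFrameInv n M f ub) :
    pvFrameInv n (PySem.List.pySetD M t v) f ub :=
  ⟨h.1, h.2.1, pvHcov_set n M f t v ht0 htl hv h.2.2.1, pvHscan_set n M f ub t v ht0 htl hv h.2.2.2⟩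

theorem pvStackRest_trig (n : Int) (M : List Int) (c c' : PvFrame n) (rest : List (PvFrame n))
    (h : c.trig = c'.trig) (hs : pvStackRest n M c rest) : pvStackRest n M c' rest := by
  cases rest with
  | nil => trivial
  | cons g rest =>
    obtain ⟨⟨t, ht, h2⟩, hinv, hrest⟩ := hs
    exact ⟨⟨t, h ▸ ht, h2⟩, hinv, hrest⟩

theorem pvStackRest_set (n : Int) (M : List Int) (t v : Int) (ht0 : 0 ≤ t)
    (htl : t < (M.length : Int)) (hv : v ≠ 0) :
    ∀ (g : PvFrame n) (rest : List (PvFrame n)), pvStackRest n M g rest →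
      (∀ u, g.trig = some u → u < t) → pvStackRest n (PySem.List.pySetD M t v) g rest := by
  intro g rest
  induction rest generalizing g with
  | nil => intro _ _; trivial
  | cons h rest ih =>
    rintro ⟨⟨u, hu, hu0, hhi, hue, huz, hlt⟩, hinv, hrest⟩ hbound
    have hut : u < t := hbound u hu
    refine ⟨⟨u, hu, hu0, hhi, hue, ?_, hlt⟩,
           pvFrameInv_set n M h (h.i - 1) t v ht0 htl hv hinv,
           ih h hrest (fun w hw => lt_trans (hlt w hw) hut)⟩
    rw [pvGetD_set M t v u ht0 htl hu0, if_neg (by omega)]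
    exact huz


-- one unfolding of the while-loop body
theorem pvRunBF_fuel (n : Int) (X D : List Int) :
    ∀ (fuel fuel' : Nat) (stack : List (PvFrame n)) (M : List Int),
      pvMeasure n stack ≤ fuel → pvMeasure n stack ≤ fuel' →
      pvRunBF n X D fuel stack M = pvRunBF n X D fuel' stack M := by
  intro fuel
  induction fuel with
  | zero =>
    intro fuel' stack M h1 h2
    cases stack with
    | nil => cases fuel' <;> rfl
    | cons f rest =>
      exfalso
      have hpos : 0 < 2 ^ (2 * (n - f.i).toNat + 1) := Nat.two_pow_pos _
      simp only [pvMeasure, List.map_cons, List.sum_cons] at h1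
      omega
  | succ fuel ih =>
    intro fuel' stack M h1 h2
    cases fuel' with
    | zero =>
      cases stack with
      | nil => rfl
      | cons f rest =>
        exfalso
        have hpos : 0 < 2 ^ (2 * (n - f.i).toNat + 1) := Nat.two_pow_pos _
        simp only [pvMeasure, List.map_cons, List.sum_cons] at h2
        omega
    | succ f' =>
      cases stack with
      | nil => rfl
      | cons f rest =>
        simp only [pvRunBF]
        by_cases hg : f.i < f.e
        · rw [if_pos hg, if_pos hg]
          by_cases hz : PySem.List.pyGetD M f.i 0 = 0
          · rw [if_pos hz, if_pos hz]
            have hd := pvMeasure_push n X D f rest hg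
            exact ih f' _ M (by omega) (by omega)
          · rw [if_neg hz, if_neg hz]
            have hd := pvMeasure_advance n f rest hg
            exact ih f' _ M (by omega) (by omega)
        · rw [if_neg hg, if_neg hg]
          cases rest with
          | nil => rfl
          | cons g rest' =>
            have hd := pvMeasure_pop n f g
              ⟨max g.i (min f.R (n - 1)), g.e, g.y + f.y, max g.R f.R, g.trig, g.he⟩ rest'
              (le_max_left _ _)
            exact ih f' _ _ (by omega) (by omega)

-- one unfolding of the while-loop body
theorem pvRunB_cons (n : Int) (X D : List Int) (f : PvFrame n) (rest : List (PvFrame n))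
    (M : List Int) :
    pvRunB n X D (f :: rest) M =
      if f.i < f.e then
        (if PySem.List.pyGetD M f.i 0 = 0 then
          pvRunB n X D (pvMkFrame n X D (f.i + 1) (some f.i) :: ⟨f.i + 1, f.e, f.y, f.R, f.trig, f.he⟩ :: rest) M
        else pvRunB n X D (⟨f.i + 1, f.e, f.y, f.R, f.trig, f.he⟩ :: rest) M)
      else
        (match rest with
         | [] => (M, f.y, f.R)
         | g :: rest' =>
           pvRunB n X D (⟨max g.i (min f.R (n - 1)), g.e, g.y + f.y, max g.R f.R, g.trig, g.he⟩ :: rest')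
             (pvApplyTrig f.trig f.y M)) := by
  show pvRunBF n X D (pvMeasure n (f :: rest)) (f :: rest) M = _
  obtain ⟨m, hm⟩ : ∃ m, pvMeasure n (f :: rest) = m + 1 := by
    have hpos : 0 < 2 ^ (2 * (n - f.i).toNat + 1) := Nat.two_pow_pos _
    simp only [pvMeasure, List.map_cons, List.sum_cons]
    exact ⟨2 ^ (2 * (n - f.i).toNat + 1) + ((rest.map fun f => 2 ^ (2 * (n - f.i).toNat + 1)).sum) - 1, by omega⟩
  rw [hm]
  simp only [pvRunBF]
  by_cases hg : f.i < f.e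
  · rw [if_pos hg, if_pos hg]
    by_cases hz : PySem.List.pyGetD M f.i 0 = 0
    · rw [if_pos hz, if_pos hz]
      have hd := pvMeasure_push n X D f rest hg
      exact pvRunBF_fuel n X D m _ _ M (by omega) le_rfl
    · rw [if_neg hz, if_neg hz]
      have hd := pvMeasure_advance n f rest hg
      exact pvRunBF_fuel n X D m _ _ M (by omega) le_rfl
  · rw [if_neg hg, if_neg hg]
    cases rest with
    | nil => rfl
    | cons g rest' =>
      have hd := pvMeasure_pop n f g
        ⟨max g.i (min f.R (n - 1)), g.e, g.y + f.y, max g.R f.R, g.trig, g.he⟩ rest'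
        (le_max_left _ _)
      exact pvRunBF_fuel n X D m _ _ _ (by omega) le_rfl

-- the machine, run from any well-formed stack, computes what A's suspended loops compute
theorem pvMaster (n : Int) (X D : List Int) :
    ∀ (k : Nat) (f : PvFrame n) (rest : List (PvFrame n)) (M : List Int),
      pvMeasure n (f :: rest) ≤ k → n - 1 ≤ (M.length : Int) → pvStackInv n M (f :: rest) →
      pvRunB n X D (f :: rest) M =
        pvUnwind n X D rest (findLoop n X D f.i f.e M f.y f.R) f.trig := by
  intro k
  induction k with
  | zero =>
    intro f rest M hm _ _
    exfalso
    have hpos : 0 < 2 ^ (2 * (n - f.i).toNat + 1) := Nat.two_pow_pos _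
    simp only [pvMeasure, List.map_cons, List.sum_cons] at hm
    omega
  | succ k ih =>
    intro f rest M hm hlen hinv
    obtain ⟨⟨hfi0, hfy, hfcov, hfscan⟩, hrest⟩ := hinv
    have hmin : min f.e (n - 1) = f.e := min_eq_left f.he
    by_cases hlt : f.i < f.e
    · by_cases hz : PySem.List.pyGetD M f.i 0 = 0
      · -- push
        have hinv' : pvStackInv n M (pvMkFrame n X D (f.i + 1) (some f.i) ::
            ⟨f.i + 1, f.e, f.y, f.R, f.trig, f.he⟩ :: rest) := by
          refine ⟨⟨?_, ?_, ?_, ?_⟩, ⟨f.i, rfl, hfi0, rfl, hlt, hz, ?_⟩,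
                 ⟨?_, hfy, hfcov, ?_⟩, pvStackRest_trig n M f _ rest rfl hrest⟩
          · simp only [pvMkFrame]; omega
          · simp only [pvMkFrame]; omega
          · intro j hj1 hj2
            simp only [pvMkFrame] at hj1 hj2
            omega
          · intro t ht
            simp only [pvMkFrame] at ht ⊢
            cases ht
            exact ⟨hfi0, by omega, fun j j1 j2 j3 => by omega⟩
          · intro u hu
            exact (hfscan u hu).2.1
          · dsimp only; omega
          · intro t ht
            dsimp only at ht ⊢
            obtain ⟨h1, h2, h3⟩ := hfscan t ht
            exact ⟨h1, by omega, fun j j1 j2 j3 => h3 j j1 (by omega) j3⟩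
        rw [pvRunB_cons, if_pos hlt, if_pos hz,
            ih (pvMkFrame n X D (f.i + 1) (some f.i)) (⟨f.i + 1, f.e, f.y, f.R, f.trig, f.he⟩ :: rest) M
              (by have := pvMeasure_push n X D f rest hlt; omega) hlen hinv']
        simp only [pvMkFrame, pvUnwind, pvApplyTrig]
        rw [findLoop_congr n X D (f.i + 1)
              (min (pvBisect X (PySem.List.pyGetD X (f.i + 1) 0 + PySem.List.pyGetD D (f.i + 1) 0)) (n - 1)) M 1
              (pvBisect X (PySem.List.pyGetD X (f.i + 1) 0 + PySem.List.pyGetD D (f.i + 1) 0))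
              (pvBisect X (PySem.List.pyGetD X (f.i + 1) 0 + PySem.List.pyGetD D (f.i + 1) 0))
              (by omega)]
        conv_rhs => rw [findLoop_eq]
        rw [hmin, if_pos hlt, if_pos hz]
      · -- advance
        have hinv' : pvStackInv n M (⟨f.i + 1, f.e, f.y, f.R, f.trig, f.he⟩ :: rest) := by
          refine ⟨⟨?_, hfy, hfcov, ?_⟩, pvStackRest_trig n M f _ rest rfl hrest⟩
          · dsimp only; omega
          · intro t ht
            dsimp only at ht ⊢
            obtain ⟨h1, h2, h3⟩ := hfscan t ht
            refine ⟨h1, by omega, fun j j1 j2 j3 => ?_⟩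
            by_cases hji : j = f.i
            · subst hji; exact hz
            · exact h3 j j1 (by omega) j3
        rw [pvRunB_cons, if_pos hlt, if_neg hz,
            ih ⟨f.i + 1, f.e, f.y, f.R, f.trig, f.he⟩ rest M
              (by have := pvMeasure_advance n f rest hlt; omega) hlen hinv']
        conv_rhs => rw [findLoop_eq]
        rw [hmin, if_pos hlt, if_neg hz]
    · -- pop
      cases rest with
      | nil =>
        rw [pvRunB_cons, if_neg hlt, findLoop_eq, hmin, if_neg hlt]
        rfl
      | cons g rest' =>
        obtain ⟨⟨t, htrig, ht0, hgi, hte, hMt, hglt⟩, ⟨hgi0, hgy, hgcov, hgscan⟩, hgrest⟩ := hrest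
        have htl : t < (M.length : Int) := by have := g.he; omega
        have hv : PySem.List.pyGetD M t 0 + f.y ≠ 0 := by rw [hMt]; omega
        set v : Int := PySem.List.pyGetD M t 0 + f.y
        set M' : List Int := PySem.List.pySetD M t v with hM'def
        -- entries strictly above the popped trigger and below the subtree's reach are nonzero
        have hside : ∀ j : Int, t < j → j < min f.R (n - 1) → PySem.List.pyGetD M j 0 ≠ 0 := by
          intro j hj1 hj2
          by_cases hjfe : j < f.e
          · exact (hfscan t htrig).2.2 j hj1 (by omega) hjfe
          · exact hfcov j (by omega) hj2
        have hset : ∀ j : Int, PySem.List.pyGetD M j 0 ≠ 0 → PySem.List.pyGetD M' j 0 ≠ 0 := by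
          intro j hj
          rcases pvGetD_set_or M t v ht0 htl j 0 with hc | hc <;> rw [hc]
          · exact hv
          · exact hj
        have hsetT : PySem.List.pyGetD M' t 0 = v := by
          rw [hM'def, pvGetD_set M t v t ht0 htl ht0, if_pos rfl]
        have hside' : ∀ j : Int, t < j → j < min f.R (n - 1) → PySem.List.pyGetD M' j 0 ≠ 0 :=
          fun j h1 h2 => hset j (hside j h1 h2)
        have hinv' : pvStackInv n M'
            (⟨max g.i (min f.R (n - 1)), g.e, g.y + f.y, max g.R f.R, g.trig, g.he⟩ :: rest') := by
          refine ⟨⟨?_, ?_, ?_, ?_⟩, ?_⟩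
          · dsimp only; omega
          · dsimp only; omega
          · intro j hj1 hj2
            dsimp only at hj1 hj2
            by_cases hjR : j < min g.R (n - 1)
            · exact hset j (hgcov j hj1 hjR)
            · exact hside' j (by omega) (by omega)
          · intro u hu
            dsimp only at hu ⊢
            obtain ⟨hu0, hui, hreg⟩ := hgscan u hu
            have hut : u < t := hglt u hu
            refine ⟨hu0, by omega, fun j j1 j2 j3 => ?_⟩
            by_cases hjlt : j < g.i - 1
            · exact hset j (hreg j j1 (by omega) j3)
            · by_cases hjt : j = t
              · subst hjt; rw [hsetT]; exact hv
              · exact hside' j (by omega) (by omega)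
          · exact pvStackRest_trig n M' g _ rest' rfl
              (pvStackRest_set n M t v ht0 htl hv g rest' hgrest hglt)
        rw [pvRunB_cons, if_neg hlt]
        show pvRunB n X D (⟨max g.i (min f.R (n - 1)), g.e, g.y + f.y, max g.R f.R, g.trig, g.he⟩ :: rest') (pvApplyTrig f.trig f.y M) = _
        rw [ih ⟨max g.i (min f.R (n - 1)), g.e, g.y + f.y, max g.R f.R, g.trig, g.he⟩ rest' (pvApplyTrig f.trig f.y M)
              (by have := pvMeasure_pop n f g ⟨max g.i (min f.R (n - 1)), g.e, g.y + f.y, max g.R f.R, g.trig, g.he⟩ rest' (le_max_left _ _); omega)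
              (by rw [htrig]; simp only [pvApplyTrig, PySem.List.length_pySetD]; exact hlen)
              (by rw [htrig]; exact hinv')]
        conv_rhs => rw [findLoop_eq]
        rw [hmin, if_neg hlt]
        simp only [pvUnwind, htrig, pvApplyTrig]
        have hstep : g.i + ((max g.i (min f.R (n - 1)) - g.i).toNat : Int) = max g.i (min f.R (n - 1)) := by
          omega
        have hskip := findLoop_skip n X D g.e (max g.i (min f.R (n - 1)) - g.i).toNat g.i
            (PySem.List.pySetD M t (PySem.List.pyGetD M t 0 + f.y)) (g.y + f.y) (max g.R f.R)
            (fun j hj1 hj2 hj3 => hside' j (by omega) (by rw [hstep] at hj2; omega))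
        rw [hstep] at hskip
        rw [← hskip]

-- ===== VERDICT (by name: the statement is the Claim_ definition above) =====
theorem find_spec : Claim_equal_find := by
  unfold Claim_equal_find
  intro l n M X D _ hpre
  obtain ⟨hl0, _, _, _, _, hlenM⟩ := hpre
  show find l n M X D = find_alt l n M X D
  unfold find find_alt
  have hinv : pvStackInv n M [pvMkFrame n X D l none] := by
    refine ⟨⟨?_, ?_, ?_, ?_⟩, trivial⟩
    · simp only [pvMkFrame]; omega
    · simp only [pvMkFrame]; omega
    · intro j hj1 hj2
      simp only [pvMkFrame] at hj1 hj2
      omega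
    · intro t ht
      exact absurd ht (by simp [pvMkFrame])
  rw [pvMaster n X D (pvMeasure n [pvMkFrame n X D l none]) (pvMkFrame n X D l none) [] M
        le_rfl hlenM hinv]
  simp only [pvUnwind, pvMkFrame]
  exact findLoop_congr n X D l _ M 1 _ _ (by omega)
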